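-- pv_equiv track=rewrite | github.com/reycardo/advent_of_code | advent_of_code/src/2025/Day6/main.py | count_spaces_after_each_char
-- ===== SOURCE A (Python) =====
-- def count_spaces_after_each_char(s):
--     result = []
--     i = 0
--     while i < len(s):
--         if s[i] != ' ':
--             count = 0
--             j = i + 1
--             while j < len(s) and s[j] == ' ':
--                 count += 1
--                 j += 1
--             result.append(count)
--         i += 1
--     return result
-- ===== SOURCE B (Python) =====
-- def count_spaces_after_each_char(s):
--     out = []
--     run = 0
--     for c in reversed(s):
--         if c == ' ':
--             run += 1
--         else:
--             out.append(run)
--             run = 0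
--     out.reverse()
--     return out
-- ===== Notes on version B (the rewrite author's own statement) =====
-- stated objective: alternative
-- what changed: Replaces A's nested index-based scan (an inner while counting spaces after each non-space char) with a single right-to-left pass maintaining a running space count that is emitted and reset at each non-space char, with a final reversal.
import Mathlib
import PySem

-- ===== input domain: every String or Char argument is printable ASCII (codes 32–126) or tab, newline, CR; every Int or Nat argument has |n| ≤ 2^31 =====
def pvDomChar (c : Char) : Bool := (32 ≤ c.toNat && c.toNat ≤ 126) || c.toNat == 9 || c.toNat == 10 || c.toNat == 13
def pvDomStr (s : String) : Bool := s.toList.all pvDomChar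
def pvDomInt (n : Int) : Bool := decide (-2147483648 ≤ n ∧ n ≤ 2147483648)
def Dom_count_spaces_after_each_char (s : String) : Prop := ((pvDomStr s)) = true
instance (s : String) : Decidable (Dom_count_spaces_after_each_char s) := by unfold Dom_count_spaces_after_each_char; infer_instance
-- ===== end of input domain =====

-- B replaces A's nested forward scan with one right-to-left pass keeping a running space count (alternative decomposition, same cost).


-- ===== PORT A =====
-- inner while loop of A: count the leading spaces of the suffix starting at j
def pvAInner : List Char → Int
  | [] => 0
  | c :: rest => if c = ' ' then 1 + pvAInner rest else 0

-- outer while loop of A: at each position, if non-space, append the inner count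
def pvAOuter : List Char → List Int
  | [] => []
  | c :: rest => if c ≠ ' ' then pvAInner rest :: pvAOuter rest else pvAOuter rest

def count_spaces_after_each_char (s : String) : List Int := pvAOuter s.toList

-- ===== PORT B =====
-- one fold over reversed(s) with state (run, out); run incremented on space, emitted and reset on non-space
def count_spaces_after_each_char_alt (s : String) : List Int :=
  let p := s.toList.reverse.foldl
    (fun (acc : Int × List Int) c =>
      if c = ' ' then (acc.1 + 1, acc.2) else (0, acc.2 ++ [acc.1])) (0, [])
  p.2.reverse

-- ===== PRECONDITION & SPEC =====
def Spec_count_spaces_after_each_char (s : String) (out : List Int) : Prop := out = count_spaces_after_each_char_alt s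
instance (s : String) (out : List Int) : Decidable (Spec_count_spaces_after_each_char s out) := by unfold Spec_count_spaces_after_each_char; infer_instance

-- ===== CLAIM (what is proved, stated in full; the proofs are below) =====
def Claim_equal_count_spaces_after_each_char : Prop := ∀ (s : String), Dom_count_spaces_after_each_char s → Spec_count_spaces_after_each_char s (count_spaces_after_each_char s)

-- ===== LEMMAS AND PROOFS =====
-- invariant of B's fold (read as a foldr over the original list): the running count
-- is A's inner count of the list, and the emitted list reversed is A's output
theorem pvB_invariant (l : List Char) :
    (l.foldr (fun c (acc : Int × List Int) =>
        if c = ' ' then (acc.1 + 1, acc.2) else (0, acc.2 ++ [acc.1])) (0, [])).1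
      = pvAInner l ∧
    (l.foldr (fun c (acc : Int × List Int) =>
        if c = ' ' then (acc.1 + 1, acc.2) else (0, acc.2 ++ [acc.1])) (0, [])).2.reverse
      = pvAOuter l := by
  induction l with
  | nil => simp [pvAInner, pvAOuter]
  | cons c rest ih =>
    obtain ⟨ih1, ih2⟩ := ih
    by_cases h : c = ' ' <;>
      simp [pvAInner, pvAOuter, h, List.foldr_cons, ih1, ih2, add_comm]

-- ===== VERDICT (by name: the statement is the Claim_ definition above) =====
theorem count_spaces_after_each_char_spec : Claim_equal_count_spaces_after_each_char := by
  intro s _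
  unfold Spec_count_spaces_after_each_char count_spaces_after_each_char count_spaces_after_each_char_alt
  rw [List.foldl_reverse]
  exact ((pvB_invariant s.toList).2).symm
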